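-- pv_equiv track=rewrite | github.com/yunusemrealtug/BachelorProjects | Term7/Introduction to AI/8-Puzzle Solver/part2.py | calcManh
-- ===== SOURCE A (Python) =====
-- def calcManh (state):
--     total=0
--     for i in range(3):
--         for j in range(3):
--             if state[i][j]!=0:
--                 total+=abs(i-(state[i][j]-1)//3)+abs(j-(state[i][j]-1)%3)
--
--     lastNum=0
--     for i in range(3):
--         if state[0][i]==1 or state[0][i]==3 or state[0][i]==2:
--             if state[0][i]-lastNum<0:
--                 total+=2
--             lastNum=state[0][i]
--     lastNum=0
--     for i in range(3):
--         if state[1][i]==4 or state[1][i]==5 or state[1][i]==6: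
--             if state[1][i]-lastNum<0:
--                 total+=2
--             lastNum=state[1][i]
--
--     lastNum=0
--     for i in range(3):
--         if state[i][0]==1 or state[i][0]==4:
--             if state[i][0]-lastNum<0:
--                 total+=2
--             lastNum=state[i][0]
--
--     lastNum=0
--     for i in range(3):
--         if state[i][1]==2 or state[i][1]==5:
--             if state[i][1]-lastNum<0:
--                 total+=2
--             lastNum=state[i][1]
--     lastNum=0
--     for i in range(3):
--         if state[i][2]==3 or state[i][2]==6:
--             if state[i][2]-lastNum<0:
--                 total+=2
--             lastNum=state[i][2]
--
--
--     return total
-- ===== SOURCE B (Python) =====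
-- # Different algorithm for the conflict term: instead of streaming each line with
-- # a last-value accumulator, enumerate candidate ordered cell PAIRS in each line
-- # and count a pair iff both values belong to the line's goal set, the later one
-- # is smaller, and no goal-set value lies between them (adjacent-in-kept pairs).
-- # Manhattan distance is a single comprehension sum.
--
-- def _conflicts(vals, goals):
--     n = 0
--     for a in range(3):
--         for b in range(a + 1, 3):
--             if (vals[a] in goals and vals[b] in goals and vals[b] < vals[a]
--                     and all(vals[m] not in goals for m in range(a + 1, b))):
--                 n += 1
--     return n
--
--
-- def calcManh(state):
--     total = sum(abs(i - (v - 1) // 3) + abs(j - (v - 1) % 3)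
--                 for i in range(3) for j in range(3)
--                 for v in [state[i][j]] if v != 0)
--     for r in range(2):
--         total += 2 * _conflicts([state[r][j] for j in range(3)],
--                                 set(range(3 * r + 1, 3 * r + 4)))
--     for c in range(3):
--         total += 2 * _conflicts([state[i][c] for i in range(3)],
--                                 {c + 1, c + 4})
--     return total
-- ===== Notes on version B (the rewrite author's own statement) =====
-- stated objective: alternative
-- what changed: A streams each of five conflict lines left-to-right with a lastNum accumulator adding 2 per descent; B instead enumerates candidate ordered cell pairs in each line and counts a pair when both values are in the line's goal set, the later is smaller, and no goal-set value lies strictly between them, driven by two short loops over rows/columns; Manhattan distance becomes one comprehension sum.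
import Mathlib
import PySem

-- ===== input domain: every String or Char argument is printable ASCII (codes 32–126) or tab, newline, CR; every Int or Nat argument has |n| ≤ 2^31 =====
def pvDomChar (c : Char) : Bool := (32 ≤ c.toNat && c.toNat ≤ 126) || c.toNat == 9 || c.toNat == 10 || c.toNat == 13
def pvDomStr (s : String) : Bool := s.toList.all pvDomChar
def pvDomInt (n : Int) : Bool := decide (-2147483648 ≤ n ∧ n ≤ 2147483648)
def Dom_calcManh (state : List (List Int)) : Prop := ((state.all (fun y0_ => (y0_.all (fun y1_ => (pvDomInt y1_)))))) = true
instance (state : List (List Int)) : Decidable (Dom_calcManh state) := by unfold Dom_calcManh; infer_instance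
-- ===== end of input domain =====

-- B replaces A's five streaming last-value accumulator loops by candidate-pair enumeration with a no-kept-cell-between test; equivalence of the RETURN value on boards A indexes without raising.

-- ===== PORT A =====
def calcManh (state : List (List Int)) : Int :=
  let total : Int :=
    (PySem.List.pyRange 0 3 1).foldl (fun total i =>
      (PySem.List.pyRange 0 3 1).foldl (fun total j =>
        if PySem.List.pyGetD (PySem.List.pyGetD state i []) j 0 ≠ 0 then
          total + |i - PySem.Int.floordiv (PySem.List.pyGetD (PySem.List.pyGetD state i []) j 0 - 1) 3|
                + |j - PySem.Int.mod (PySem.List.pyGetD (PySem.List.pyGetD state i []) j 0 - 1) 3|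
        else total) total) 0
  let p1 := (PySem.List.pyRange 0 3 1).foldl (fun (p : Int × Int) i =>
      if PySem.List.pyGetD (PySem.List.pyGetD state 0 []) i 0 = 1 ∨ PySem.List.pyGetD (PySem.List.pyGetD state 0 []) i 0 = 3 ∨ PySem.List.pyGetD (PySem.List.pyGetD state 0 []) i 0 = 2 then
        (if PySem.List.pyGetD (PySem.List.pyGetD state 0 []) i 0 - p.2 < 0 then p.1 + 2 else p.1,
         PySem.List.pyGetD (PySem.List.pyGetD state 0 []) i 0)
      else p) (total, 0)
  let p2 := (PySem.List.pyRange 0 3 1).foldl (fun (p : Int × Int) i =>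
      if PySem.List.pyGetD (PySem.List.pyGetD state 1 []) i 0 = 4 ∨ PySem.List.pyGetD (PySem.List.pyGetD state 1 []) i 0 = 5 ∨ PySem.List.pyGetD (PySem.List.pyGetD state 1 []) i 0 = 6 then
        (if PySem.List.pyGetD (PySem.List.pyGetD state 1 []) i 0 - p.2 < 0 then p.1 + 2 else p.1,
         PySem.List.pyGetD (PySem.List.pyGetD state 1 []) i 0)
      else p) (p1.1, 0)
  let p3 := (PySem.List.pyRange 0 3 1).foldl (fun (p : Int × Int) i =>
      if PySem.List.pyGetD (PySem.List.pyGetD state i []) 0 0 = 1 ∨ PySem.List.pyGetD (PySem.List.pyGetD state i []) 0 0 = 4 then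
        (if PySem.List.pyGetD (PySem.List.pyGetD state i []) 0 0 - p.2 < 0 then p.1 + 2 else p.1,
         PySem.List.pyGetD (PySem.List.pyGetD state i []) 0 0)
      else p) (p2.1, 0)
  let p4 := (PySem.List.pyRange 0 3 1).foldl (fun (p : Int × Int) i =>
      if PySem.List.pyGetD (PySem.List.pyGetD state i []) 1 0 = 2 ∨ PySem.List.pyGetD (PySem.List.pyGetD state i []) 1 0 = 5 then
        (if PySem.List.pyGetD (PySem.List.pyGetD state i []) 1 0 - p.2 < 0 then p.1 + 2 else p.1,
         PySem.List.pyGetD (PySem.List.pyGetD state i []) 1 0)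
      else p) (p3.1, 0)
  let p5 := (PySem.List.pyRange 0 3 1).foldl (fun (p : Int × Int) i =>
      if PySem.List.pyGetD (PySem.List.pyGetD state i []) 2 0 = 3 ∨ PySem.List.pyGetD (PySem.List.pyGetD state i []) 2 0 = 6 then
        (if PySem.List.pyGetD (PySem.List.pyGetD state i []) 2 0 - p.2 < 0 then p.1 + 2 else p.1,
         PySem.List.pyGetD (PySem.List.pyGetD state i []) 2 0)
      else p) (p4.1, 0)
  p5.1

-- ===== PORT B =====
-- _conflicts: count ordered cell pairs (a,b), a<b, both values in the goal set, later value smaller,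
-- and no goal-set value at a cell strictly between them.
def pvConflicts (vals : List Int) (goals : List Int) : Int :=
  (PySem.List.pyRange 0 3 1).foldl (fun n a =>
    (PySem.List.pyRange (a + 1) 3 1).foldl (fun n b =>
      if PySem.List.pyGetD vals a 0 ∈ goals ∧ PySem.List.pyGetD vals b 0 ∈ goals ∧
         PySem.List.pyGetD vals b 0 < PySem.List.pyGetD vals a 0 ∧
         (PySem.List.pyRange (a + 1) b 1).all (fun m => decide (PySem.List.pyGetD vals m 0 ∉ goals))
      then n + 1 else n) n) 0

def calcManh_alt (state : List (List Int)) : Int :=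
  let total : Int :=
    ((PySem.List.pyRange 0 3 1).flatMap (fun i =>
      (PySem.List.pyRange 0 3 1).flatMap (fun j =>
        if PySem.List.pyGetD (PySem.List.pyGetD state i []) j 0 ≠ 0 then
          [|i - PySem.Int.floordiv (PySem.List.pyGetD (PySem.List.pyGetD state i []) j 0 - 1) 3|
           + |j - PySem.Int.mod (PySem.List.pyGetD (PySem.List.pyGetD state i []) j 0 - 1) 3|]
        else []))).sum
  let total := (PySem.List.pyRange 0 2 1).foldl (fun total r =>
      total + 2 * pvConflicts
        ((PySem.List.pyRange 0 3 1).map (fun j => PySem.List.pyGetD (PySem.List.pyGetD state r []) j 0))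
        (PySem.Set.ofList (PySem.List.pyRange (3 * r + 1) (3 * r + 4) 1))) total
  (PySem.List.pyRange 0 3 1).foldl (fun total c =>
      total + 2 * pvConflicts
        ((PySem.List.pyRange 0 3 1).map (fun i => PySem.List.pyGetD (PySem.List.pyGetD state i []) c 0))
        (PySem.Set.ofList [c + 1, c + 4])) total

-- ===== PRECONDITION & SPEC =====
-- Pre_ excludes exactly the boards on which A raises IndexError: fewer than 3 rows, or one of the first three rows shorter than 3.
def Pre_calcManh (state : List (List Int)) : Prop :=
  3 ≤ state.length ∧ ∀ row ∈ state.take 3, 3 ≤ row.length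
instance (state : List (List Int)) : Decidable (Pre_calcManh state) := by unfold Pre_calcManh; infer_instance
def pvWitness_calcManh : List (List Int) := [[1,2,3],[4,5,6],[7,8,0]]

def Spec_calcManh (state : List (List Int)) (out : Int) : Prop := out = calcManh_alt state
instance (state : List (List Int)) (out : Int) : Decidable (Spec_calcManh state out) := by unfold Spec_calcManh; infer_instance

-- ===== CLAIM (what is proved, stated in full; the proofs are below) =====
def Claim_equal_calcManh : Prop := ∀ (state : List (List Int)), Dom_calcManh state → Pre_calcManh state → Spec_calcManh state (calcManh state)

-- ===== LEMMAS AND PROOFS =====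

theorem pv_add_if (c : Prop) [Decidable c] (t x y : Int) :
    (if c then t + x + y else t) = t + (if c then x + y else 0) := by
  split <;> ring

theorem pv_sum_if (c : Prop) [Decidable c] (x : Int) :
    (if c then [x] else ([] : List Int)).sum = (if c then x else 0) := by
  split <;> simp

theorem manhA_eq (v : Int → Int → Int) :
    ((PySem.List.pyRange 0 3 1).foldl (fun total i =>
      (PySem.List.pyRange 0 3 1).foldl (fun total j =>
        if v i j ≠ 0 then
          total + |i - PySem.Int.floordiv (v i j - 1) 3|
                + |j - PySem.Int.mod (v i j - 1) 3|
        else total) total) (0:Int))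
  = ((PySem.List.pyRange 0 3 1).flatMap (fun i =>
      (PySem.List.pyRange 0 3 1).flatMap (fun j =>
        if v i j ≠ 0 then
          [|i - PySem.Int.floordiv (v i j - 1) 3|
           + |j - PySem.Int.mod (v i j - 1) 3|]
        else []))).sum := by
  have h3 : PySem.List.pyRange 0 3 1 = [0,1,2] := rfl
  rw [h3]
  simp only [List.foldl_cons, List.foldl_nil, List.flatMap_cons, List.flatMap_nil,
    List.sum_append, List.append_nil, pv_add_if, pv_sum_if]
  ring

-- pvConflicts on an explicit 3-list, as three pair tests.
theorem conflicts3 (v0 v1 v2 : Int) (g : List Int) :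
    pvConflicts [v0, v1, v2] g
  = (if v0 ∈ g ∧ v1 ∈ g ∧ v1 < v0 then 1 else 0)
  + (if v0 ∈ g ∧ v2 ∈ g ∧ v2 < v0 ∧ v1 ∉ g then 1 else 0)
  + (if v1 ∈ g ∧ v2 ∈ g ∧ v2 < v1 then 1 else 0) := by
  have e0 : PySem.List.pyGetD [v0, v1, v2] 0 0 = v0 := rfl
  have e1 : PySem.List.pyGetD [v0, v1, v2] 1 0 = v1 := rfl
  have e2 : PySem.List.pyGetD [v0, v1, v2] 2 0 = v2 := rfl
  have r0 : PySem.List.pyRange 0 3 1 = [0, 1, 2] := rfl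
  have ra : PySem.List.pyRange (0 + 1) 3 1 = [1, 2] := rfl
  have rb : PySem.List.pyRange (1 + 1) 3 1 = [2] := rfl
  have rc : PySem.List.pyRange (2 + 1) 3 1 = [] := rfl
  have rd : PySem.List.pyRange (0 + 1) 1 1 = [] := rfl
  have re : PySem.List.pyRange (0 + 1) 2 1 = [1] := rfl
  have rf : PySem.List.pyRange (1 + 1) 2 1 = [] := rfl
  simp only [pvConflicts, r0, List.foldl_cons, List.foldl_nil, ra, rb, rc, rd, re, rf,
    e0, e1, e2, List.all_cons, List.all_nil, Bool.and_true, decide_eq_true_eq]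
  split_ifs <;> simp_all

theorem lineP1 (v : Int → Int) (t : Int) :
    ((PySem.List.pyRange 0 3 1).foldl (fun (p : Int × Int) i =>
      if v i = 1 ∨ v i = 3 ∨ v i = 2 then
        (if v i - p.2 < 0 then p.1 + 2 else p.1, v i)
      else p) (t, 0)).1
  = t + 2 * pvConflicts [v 0, v 1, v 2] [1, 2, 3] := by
  have h3 : PySem.List.pyRange 0 3 1 = [0,1,2] := rfl
  rw [h3, conflicts3]
  have H : ∀ w : Int, w = 1 ∨ w = 2 ∨ w = 3 ∨ (¬w = 1 ∧ ¬w = 2 ∧ ¬w = 3) := fun w => by tauto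
  rcases H (v 0) with h0|h0|h0|h0 <;> rcases H (v 1) with h1|h1|h1|h1 <;>
    rcases H (v 2) with h2|h2|h2|h2 <;>
    simp [h0, h1, h2] <;> omega

theorem lineP2 (v : Int → Int) (t : Int) :
    ((PySem.List.pyRange 0 3 1).foldl (fun (p : Int × Int) i =>
      if v i = 4 ∨ v i = 5 ∨ v i = 6 then
        (if v i - p.2 < 0 then p.1 + 2 else p.1, v i)
      else p) (t, 0)).1
  = t + 2 * pvConflicts [v 0, v 1, v 2] [4, 5, 6] := by
  have h3 : PySem.List.pyRange 0 3 1 = [0,1,2] := rfl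
  rw [h3, conflicts3]
  have H : ∀ w : Int, w = 4 ∨ w = 5 ∨ w = 6 ∨ (¬w = 4 ∧ ¬w = 5 ∧ ¬w = 6) := fun w => by tauto
  rcases H (v 0) with h0|h0|h0|h0 <;> rcases H (v 1) with h1|h1|h1|h1 <;>
    rcases H (v 2) with h2|h2|h2|h2 <;>
    simp [h0, h1, h2] <;> omega

theorem lineP3 (v : Int → Int) (t : Int) :
    ((PySem.List.pyRange 0 3 1).foldl (fun (p : Int × Int) i =>
      if v i = 1 ∨ v i = 4 then
        (if v i - p.2 < 0 then p.1 + 2 else p.1, v i)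
      else p) (t, 0)).1
  = t + 2 * pvConflicts [v 0, v 1, v 2] [1, 4] := by
  have h3 : PySem.List.pyRange 0 3 1 = [0,1,2] := rfl
  rw [h3, conflicts3]
  have H : ∀ w : Int, w = 1 ∨ w = 4 ∨ (¬w = 1 ∧ ¬w = 4) := fun w => by tauto
  rcases H (v 0) with h0|h0|h0 <;> rcases H (v 1) with h1|h1|h1 <;>
    rcases H (v 2) with h2|h2|h2 <;>
    simp [h0, h1, h2]

theorem lineP4 (v : Int → Int) (t : Int) :
    ((PySem.List.pyRange 0 3 1).foldl (fun (p : Int × Int) i =>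
      if v i = 2 ∨ v i = 5 then
        (if v i - p.2 < 0 then p.1 + 2 else p.1, v i)
      else p) (t, 0)).1
  = t + 2 * pvConflicts [v 0, v 1, v 2] [2, 5] := by
  have h3 : PySem.List.pyRange 0 3 1 = [0,1,2] := rfl
  rw [h3, conflicts3]
  have H : ∀ w : Int, w = 2 ∨ w = 5 ∨ (¬w = 2 ∧ ¬w = 5) := fun w => by tauto
  rcases H (v 0) with h0|h0|h0 <;> rcases H (v 1) with h1|h1|h1 <;>
    rcases H (v 2) with h2|h2|h2 <;>
    simp [h0, h1, h2]

theorem lineP5 (v : Int → Int) (t : Int) :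
    ((PySem.List.pyRange 0 3 1).foldl (fun (p : Int × Int) i =>
      if v i = 3 ∨ v i = 6 then
        (if v i - p.2 < 0 then p.1 + 2 else p.1, v i)
      else p) (t, 0)).1
  = t + 2 * pvConflicts [v 0, v 1, v 2] [3, 6] := by
  have h3 : PySem.List.pyRange 0 3 1 = [0,1,2] := rfl
  rw [h3, conflicts3]
  have H : ∀ w : Int, w = 3 ∨ w = 6 ∨ (¬w = 3 ∧ ¬w = 6) := fun w => by tauto
  rcases H (v 0) with h0|h0|h0 <;> rcases H (v 1) with h1|h1|h1 <;>
    rcases H (v 2) with h2|h2|h2 <;>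
    simp [h0, h1, h2]

-- ===== VERDICT (by name: the statement is the Claim_ definition above) =====
theorem calcManh_spec : Claim_equal_calcManh := by
  intro state _ _
  show calcManh state = calcManh_alt state
  have s1 : PySem.Set.ofList (PySem.List.pyRange (3*0+1) (3*0+4) 1) = [1,2,3] := rfl
  have s2 : PySem.Set.ofList (PySem.List.pyRange (3*1+1) (3*1+4) 1) = [4,5,6] := rfl
  have s3 : PySem.Set.ofList [(0:Int)+1, 0+4] = [1,4] := rfl
  have s4 : PySem.Set.ofList [(1:Int)+1, 1+4] = [2,5] := rfl
  have s5 : PySem.Set.ofList [(2:Int)+1, 2+4] = [3,6] := rfl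
  have hr2 : PySem.List.pyRange 0 2 1 = [0,1] := rfl
  have hr3 : PySem.List.pyRange 0 3 1 = [0,1,2] := rfl
  simp only [calcManh, calcManh_alt, manhA_eq, lineP1, lineP2, lineP3, lineP4, lineP5]
  rw [hr2]
  simp only [hr3, List.map_cons, List.map_nil, List.foldl_cons, List.foldl_nil, s1, s2, s3, s4, s5]
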